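-- pv_equiv track=rewrite | github.com/larryli/PuTTY | unicode/read_ucd.py | to_ranges
-- ===== SOURCE A (Python) =====
-- def to_ranges(iterable):
--     """Collect together adjacent ranges in a list of (key, value) pairs.
--
--     The input iterable should deliver a sequence of (key, value) pairs
--     in which the keys are integers in sorted order. The output is a
--     sequence of tuples with structure ((start, end), value), each
--     indicating that all the keys [start, start+1, ..., end] go with
--     that value.
--     """
--     start = end = val = None
--
--     for k, v in iterable:
--         if (k-1, v) == (end, val):
--             end = k
--         else:
--             if start is not None:
--                 yield (start, end), val
--             start, end, val = k, k, v
--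
--     if start is not None:
--         yield (start, end), val
-- ===== SOURCE B (Python) =====
-- def _sig(t):
--     # (value, key - index) is constant exactly across a maximal run of
--     # same-value keys incrementing by 1.
--     return (t[1][1], t[1][0] - t[0])
--
-- def to_ranges(iterable):
--     ts = list(enumerate(iterable))
--     i, n = 0, len(ts)
--     while i < n:
--         sig = _sig(ts[i])
--         j = i + 1
--         while j < n and _sig(ts[j]) == sig:
--             j += 1
--         yield (ts[i][1][0], ts[j - 1][1][0]), ts[i][1][1]
--         i = j
-- ===== Notes on version B (the rewrite author's own statement) =====
-- stated objective: alternative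
-- what changed: Replaces A's start/end/val state machine with signature-based run grouping: each pair is tagged with (value, key - index), which is constant exactly across a maximal contiguous run, and each run is emitted from its first and last element.
import Mathlib
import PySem

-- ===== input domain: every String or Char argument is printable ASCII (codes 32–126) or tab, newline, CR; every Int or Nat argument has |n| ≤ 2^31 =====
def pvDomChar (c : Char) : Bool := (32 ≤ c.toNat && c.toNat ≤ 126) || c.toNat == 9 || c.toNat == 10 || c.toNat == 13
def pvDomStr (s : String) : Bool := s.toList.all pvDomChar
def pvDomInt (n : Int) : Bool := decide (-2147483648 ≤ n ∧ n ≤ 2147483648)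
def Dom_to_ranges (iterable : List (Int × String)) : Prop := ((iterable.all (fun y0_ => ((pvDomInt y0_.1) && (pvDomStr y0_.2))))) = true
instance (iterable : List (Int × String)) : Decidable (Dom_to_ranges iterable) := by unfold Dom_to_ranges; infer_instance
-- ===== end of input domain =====

-- B replaces A's start/end/val state machine with signature-based run grouping
-- over enumerated pairs (objective: alternative; equal cost).


-- ===== PORT A =====
-- state = some (start, end, val) once a range is open, none before (start/end/val = None)
def toRangesLoop : List (Int × String) → Option (Int × Int × String) → List ((Int × Int) × String)
  | [], none => []
  | [], some (s, e, v) => [((s, e), v)]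
  | (k, v') :: rest, none => toRangesLoop rest (some (k, k, v'))
  | (k, v') :: rest, some (s, e, v) =>
      if (k - 1, v') = (e, v) then toRangesLoop rest (some (s, k, v))
      else ((s, e), v) :: toRangesLoop rest (some (k, k, v'))

def to_ranges (iterable : List (Int × String)) : List ((Int × Int) × String) :=
  toRangesLoop iterable none

-- ===== PORT B =====
-- signature of an enumerated pair (i, (k, v)): (v, k - i)
def pvSig (t : Int × (Int × String)) : String × Int := (t.2.2, t.2.1 - t.1)

-- transliteration of Source B's inner while: split off the maximal prefix with signature = sig
def pvTakeRun (sig : String × Int) : List (Int × (Int × String)) →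
    List (Int × (Int × String)) × List (Int × (Int × String))
  | [] => ([], [])
  | t :: ts =>
      if pvSig t = sig then
        let pr := pvTakeRun sig ts
        (t :: pr.1, pr.2)
      else ([], t :: ts)

theorem pvTakeRun_snd_le (sig : String × Int) (ts : List (Int × (Int × String))) :
    (pvTakeRun sig ts).2.length ≤ ts.length := by
  induction ts with
  | nil => simp [pvTakeRun]
  | cons t ts ih =>
      simp only [pvTakeRun]
      split
      · exact le_trans ih (Nat.le_succ _)
      · exact le_refl _

-- transliteration of Source B's outer while: emit one range per maximal run
def pvGo : List (Int × (Int × String)) → List ((Int × Int) × String)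
  | [] => []
  | t :: ts =>
      let pr := pvTakeRun (pvSig t) ts
      ((t.2.1, ((t :: pr.1).getLastD (0, (0, ""))).2.1), t.2.2) :: pvGo pr.2
termination_by l => l.length
decreasing_by
  simpa using Nat.lt_succ_of_le (pvTakeRun_snd_le (pvSig t) ts)

-- transliteration of enumerate(iterable)
def pvEnumFrom (i : Int) : List (Int × String) → List (Int × (Int × String))
  | [] => []
  | x :: xs => (i, x) :: pvEnumFrom (i + 1) xs

def to_ranges_alt (iterable : List (Int × String)) : List ((Int × Int) × String) :=
  pvGo (pvEnumFrom 0 iterable)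

-- ===== PRECONDITION & SPEC =====
def Spec_to_ranges (iterable : List (Int × String)) (out : List ((Int × Int) × String)) : Prop := out = to_ranges_alt iterable
instance (iterable : List (Int × String)) (out : List ((Int × Int) × String)) : Decidable (Spec_to_ranges iterable out) := by unfold Spec_to_ranges; infer_instance

-- ===== CLAIM (what is proved, stated in full; the proofs are below) =====
def Claim_equal_to_ranges : Prop := ∀ (iterable : List (Int × String)), Dom_to_ranges iterable → Spec_to_ranges iterable (to_ranges iterable)

-- ===== LEMMAS AND PROOFS =====

-- reference formulation: maximal runs, recursively
def runsGo (s e : Int) (v : String) : List (Int × String) → List ((Int × Int) × String)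
  | [] => [((s, e), v)]
  | (k, v') :: rest =>
      if (k - 1, v') = (e, v) then runsGo s k v rest
      else ((s, e), v) :: runsGo k k v' rest

def runs : List (Int × String) → List ((Int × Int) × String)
  | [] => []
  | (k, v) :: rest => runsGo k k v rest

theorem toRangesLoop_some (l : List (Int × String)) :
    ∀ s e v, toRangesLoop l (some (s, e, v)) = runsGo s e v l := by
  induction l with
  | nil => intro s e v; rfl
  | cons p rest ih =>
      intro s e v
      obtain ⟨k, v'⟩ := p
      simp only [toRangesLoop, runsGo]
      split <;> simp [ih]

-- split of the continuing chain after (·, e, v)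
def chainSplit (e : Int) (v : String) : List (Int × String) →
    List (Int × String) × List (Int × String)
  | [] => ([], [])
  | (k, v') :: rest =>
      if (k - 1, v') = (e, v) then
        let pr := chainSplit k v rest
        ((k, v') :: pr.1, pr.2)
      else ([], (k, v') :: rest)

theorem chainSplit_snd_le (e : Int) (v : String) (l : List (Int × String)) :
    (chainSplit e v l).2.length ≤ l.length := by
  induction l generalizing e with
  | nil => simp [chainSplit]
  | cons p rest ih =>
      obtain ⟨k, v'⟩ := p
      simp only [chainSplit]
      split
      · exact le_trans (ih k) (Nat.le_succ _)
      · exact le_refl _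

def lastKeyD (e : Int) (a : List (Int × String)) : Int :=
  ((a.getLast?).map Prod.fst).getD e

theorem runsGo_chainSplit (l : List (Int × String)) :
    ∀ s e v, runsGo s e v l =
      ((s, lastKeyD e (chainSplit e v l).1), v) :: runs (chainSplit e v l).2 := by
  induction l with
  | nil => intro s e v; simp [runsGo, chainSplit, lastKeyD, runs]
  | cons p rest ih =>
      intro s e v
      obtain ⟨k, v'⟩ := p
      simp only [runsGo, chainSplit]
      split
      · rename_i h
        rw [ih s k v]
        have hv : v' = v := by
          have := (Prod.mk.injEq _ _ _ _).mp h; exact this.2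
        subst hv
        congr 1
        simp only [lastKeyD]
        cases ha : (chainSplit k v' rest).1 with
        | nil => simp
        | cons q a =>
            cases h2 : (q :: a).getLast? with
            | none => simp [List.getLast?_eq_none_iff] at h2
            | some x => simp [h2]
      · simp [runs, lastKeyD]

theorem pvTakeRun_enum (l : List (Int × String)) :
    ∀ (j e : Int) (v : String),
      pvTakeRun (v, e - j) (pvEnumFrom (j + 1) l) =
        (pvEnumFrom (j + 1) (chainSplit e v l).1,
         pvEnumFrom (j + 1 + (chainSplit e v l).1.length) (chainSplit e v l).2) := by
  induction l with
  | nil => intro j e v; simp [pvEnumFrom, pvTakeRun, chainSplit]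
  | cons p rest ih =>
      intro j e v
      obtain ⟨k, v'⟩ := p
      simp only [pvEnumFrom, pvTakeRun, chainSplit, pvSig]
      by_cases h : k - 1 = e ∧ v' = v
      · obtain ⟨h1, h2⟩ := h
        subst h2
        have hs : ((v', k - (j + 1)) : String × Int) = (v', e - j) := by
          rw [Prod.mk.injEq]; exact ⟨rfl, by omega⟩
        rw [if_pos hs, if_pos (by rw [Prod.mk.injEq]; exact ⟨h1, rfl⟩)]
        rw [show ((v', e - j) : String × Int) = (v', k - (j + 1)) from hs.symm]
        rw [ih (j + 1) k v']
        simp only [pvEnumFrom, List.length_cons, Prod.mk.injEq]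
        refine ⟨trivial, ?_⟩
        have hidx : (j + 1 + 1 + ((chainSplit k v' rest).1.length : Int)) =
            j + 1 + (((chainSplit k v' rest).1.length + 1 : ℕ) : Int) := by push_cast; ring
        rw [hidx]
      · have hs : ¬ ((v', k - (j + 1)) : String × Int) = (v, e - j) := by
          intro hc
          rw [Prod.mk.injEq] at hc
          exact h ⟨by omega, hc.1⟩
        rw [if_neg hs, if_neg (by rw [Prod.mk.injEq]; intro hc; exact h ⟨hc.1, hc.2⟩)]
        simp [pvEnumFrom]

theorem getLastD_enumFrom (a : List (Int × String)) :
    ∀ (m : Int) (t : Int × (Int × String)),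
      ((pvEnumFrom m a).getLastD t).2.1 = ((a.getLast?).map Prod.fst).getD t.2.1 := by
  induction a with
  | nil => intro m t; simp [pvEnumFrom]
  | cons q a ih =>
      intro m t
      obtain ⟨k, v⟩ := q
      simp only [pvEnumFrom]
      rw [List.getLastD_cons, ih (m + 1) (m, (k, v))]
      cases h2 : a.getLast? with
      | none =>
          have : a = [] := List.getLast?_eq_none_iff.mp h2
          subst this; simp
      | some x =>
          have h3 : ((k, v) :: a).getLast? = some x := by
            cases a with
            | nil => simp at h2
            | cons b l => rw [List.getLast?_cons_cons]; exact h2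
          simp [h3]

theorem getLastD_enum (t : Int × (Int × String)) (a : List (Int × String)) (m : Int) :
    ((t :: pvEnumFrom m a).getLastD (0, (0, ""))).2.1 = lastKeyD t.2.1 a := by
  rw [List.getLastD_cons, getLastD_enumFrom a m t, lastKeyD]

theorem pvGo_enum (n : ℕ) : ∀ (l : List (Int × String)) (j : Int),
    l.length ≤ n → pvGo (pvEnumFrom j l) = runs l := by
  induction n with
  | zero =>
      intro l j h
      have : l = [] := List.length_eq_zero_iff.mp (Nat.le_zero.mp h)
      subst this; simp [pvEnumFrom, pvGo, runs]
  | succ n ih =>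
      intro l j h
      cases l with
      | nil => simp [pvEnumFrom, pvGo, runs]
      | cons p rest =>
          obtain ⟨k, v⟩ := p
          simp only [pvEnumFrom, pvGo, pvSig]
          rw [pvTakeRun_enum rest j k v]
          rw [getLastD_enum (j, (k, v)) (chainSplit k v rest).1 (j + 1)]
          have hlen : (chainSplit k v rest).2.length ≤ n := by
            have := chainSplit_snd_le k v rest
            simp only [List.length_cons] at h
            omega
          rw [ih _ _ hlen]
          have hr : runs ((k, v) :: rest) = runsGo k k v rest := rfl
          rw [hr, runsGo_chainSplit rest k k v]

-- ===== VERDICT (by name: the statement is the Claim_ definition above) =====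
theorem to_ranges_spec : Claim_equal_to_ranges := by
  intro l _
  unfold Spec_to_ranges to_ranges to_ranges_alt
  rw [pvGo_enum l.length l 0 (le_refl _)]
  cases l with
  | nil => rfl
  | cons p rest =>
      obtain ⟨k, v⟩ := p
      simp only [toRangesLoop, runs]
      exact toRangesLoop_some rest k k v
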